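-- pv_equiv track=rewrite | github.com/majkeleq/sudokuSolver | sudoku.py | unikatyPiony
-- ===== SOURCE A (Python) =====
-- def czytajPiony(sudoku):
--     piony=[[],[],[],[],[],[],[],[],[]]
--     for i in range(0,len(sudoku)):
--         for j in range(0,len(sudoku)):
--             piony[j].append(sudoku[i][j])
--     return piony
--
-- def unikatyPiony(mozliwosci):# sprawdza czy jakaś możliwość w komórce może być jedyną taką wartością w pionie - jeśli tak to wpisuje ją na sztywno jako jedyną możliwość
--     piony=czytajPiony(mozliwosci)
--     for x in range(0,len(piony)):#dla każdego pionu
--         roznica=[None]*9# pusta tablica do wyłapania pojedynczej wartości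
--         for i in range(0,len(piony[x])):
--             temp=[] #tablica która przechowuje wartości z komórek poza tą w której się znajdujemy
--             for j in range(0,len(piony[x])):
--                 if i!=j:
--                     temp.extend(piony[x][j])
--             #list(set(piony[x][i])-set(temp)) - sprawdza możliwości na konkretnym miejscu w pionie i odejmuje od nich pozostałe możliwości w pionie - różnica zostaje zapisana
--             if roznica[i]==None:
--                 roznica[i]=list(set(piony[x][i])-set(temp))
--             #else:
--             #    roznica[i].append(list(set(piony[x][i])-set(temp)))   #else chyba nigdy się nie wykona
--         #jesli różnica to pojedyncza wartość to zostaje potraktowana jako jedyna możliwość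
--         for i in range(0,len(piony[x])):
--             if len(roznica[i])==1:
--                 mozliwosci[i][x]=roznica[i]
--     return mozliwosci
-- ===== SOURCE B (Python) =====
-- # One shared per-column frequency table replaces the O(n^2) per-cell rescan of all
-- # other cells; mutates mozliwosci in place (same as the original) and returns it.
-- def unikatyPiony(mozliwosci):
--     n = len(mozliwosci)
--     cols = [[mozliwosci[i][x] for i in range(n)] for x in range(n)]
--     for x in range(n):
--         col = cols[x]
--         cnt = {}
--         for cell in col:
--             for v in set(cell):
--                 cnt[v] = cnt.get(v, 0) + 1
--         for i in range(n):
--             roznica = [v for v in set(col[i]) if cnt.get(v, 0) == 1]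
--             if len(roznica) == 1:
--                 mozliwosci[i][x] = roznica
--     return mozliwosci
-- ===== Notes on version B (the rewrite author's own statement) =====
-- stated objective: faster
-- what changed: B builds one frequency table per column (how many cells contain each candidate) in a single pass and reads per-cell uniqueness from it, instead of A's re-collecting every other cell's possibilities for each cell of each column.
import Mathlib
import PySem

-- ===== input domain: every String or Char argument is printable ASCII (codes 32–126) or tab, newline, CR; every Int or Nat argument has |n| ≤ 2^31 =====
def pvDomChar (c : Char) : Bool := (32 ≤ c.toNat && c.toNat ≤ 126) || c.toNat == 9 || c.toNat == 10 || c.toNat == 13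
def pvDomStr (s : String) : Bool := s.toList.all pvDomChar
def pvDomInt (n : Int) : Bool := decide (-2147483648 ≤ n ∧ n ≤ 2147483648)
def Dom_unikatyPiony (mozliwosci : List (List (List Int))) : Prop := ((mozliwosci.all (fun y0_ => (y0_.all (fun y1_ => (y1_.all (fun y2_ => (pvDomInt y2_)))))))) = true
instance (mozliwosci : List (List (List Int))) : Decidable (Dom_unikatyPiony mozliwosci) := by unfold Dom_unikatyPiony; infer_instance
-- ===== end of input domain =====

-- B replaces A's per-cell re-collection of all other cells of a column by one shared
-- per-column frequency table; both Pythons mutate the argument in place — the equivalence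
-- proved here is about the returned value (which is that same, identically updated grid).

-- ===== PORT A =====
def czytajPiony (sudoku : List (List (List Int))) : List (List (List Int)) :=
  (List.range sudoku.length).foldl (fun piony i =>
    (List.range sudoku.length).foldl (fun piony j =>
      piony.modify j (fun col => col ++ [(sudoku.getD i []).getD j []])) piony)
    (List.replicate 9 [])

def unikatyPiony (mozliwosci : List (List (List Int))) : List (List (List Int)) :=
  let piony := czytajPiony mozliwosci
  (List.range piony.length).foldl (fun moz x =>
    let pion := piony.getD x []
    let roznica : List (Option (List Int)) :=
      (List.range pion.length).foldl (fun r i =>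
        let temp := (List.range pion.length).foldl (fun t j =>
            if i ≠ j then t ++ pion.getD j [] else t) []
        if r.getD i none = none then
          r.set i (some (PySem.Set.diff (PySem.Set.ofList (pion.getD i [])) (PySem.Set.ofList temp)))
        else r)
      (List.replicate 9 none)
    (List.range pion.length).foldl (fun moz i =>
      if ((roznica.getD i none).getD []).length = 1 then
        moz.modify i (fun row => row.set x ((roznica.getD i none).getD []))
      else moz) moz) mozliwosci

-- ===== PORT B =====
def unikatyPiony_alt (mozliwosci : List (List (List Int))) : List (List (List Int)) :=
  let n := mozliwosci.length
  let cols := (List.range n).map (fun x => (List.range n).map (fun i => (mozliwosci.getD i []).getD x []))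
  (List.range n).foldl (fun moz x =>
    let col := cols.getD x []
    let cnt : PySem.Dict Int Int := col.foldl (fun d cell =>
        (PySem.Set.ofList cell).foldl (fun d v => d.insert v (d.getD v 0 + 1)) d) PySem.Dict.empty
    (List.range n).foldl (fun moz i =>
      let roznica := (PySem.Set.ofList (col.getD i [])).filter (fun v => cnt.getD v 0 == 1)
      if roznica.length = 1 then moz.modify i (fun row => row.set x roznica) else moz) moz) mozliwosci

-- ===== PRECONDITION & SPEC =====
-- Pre_ is exactly A's domain: A indexes a fixed table of 9 columns (IndexError for more
-- than 9 rows) and reads cell [i][j] for every j below the row count (IndexError when a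
-- row is shorter than the number of rows).
def Pre_unikatyPiony (mozliwosci : List (List (List Int))) : Prop :=
  mozliwosci.length ≤ 9 ∧ ∀ row ∈ mozliwosci, mozliwosci.length ≤ row.length
instance (mozliwosci : List (List (List Int))) : Decidable (Pre_unikatyPiony mozliwosci) := by unfold Pre_unikatyPiony; infer_instance

def pvWitness_unikatyPiony : List (List (List Int)) :=
  [[[1, 2], [1]], [[2], [1, 3]]]

def Spec_unikatyPiony (mozliwosci : List (List (List Int))) (out : List (List (List Int))) : Prop := out = unikatyPiony_alt mozliwosci
instance (mozliwosci : List (List (List Int))) (out : List (List (List Int))) : Decidable (Spec_unikatyPiony mozliwosci out) := by unfold Spec_unikatyPiony; infer_instance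

-- ===== CLAIM (what is proved, stated in full; the proofs are below) =====
def Claim_equal_unikatyPiony : Prop := ∀ (mozliwosci : List (List (List Int))), Dom_unikatyPiony mozliwosci → Pre_unikatyPiony mozliwosci → Spec_unikatyPiony mozliwosci (unikatyPiony mozliwosci)

-- ===== LEMMAS AND PROOFS =====

-- getD on a map over List.range
theorem getD_map_range' {α : Type} (g : Nat → α) (r x : Nat) (d : α) :
    ((List.range r).map g).getD x d = if x < r then g x else d := by
  simp [List.getD, List.getElem?_map]
  split_ifs <;> simp [*]

-- modify on a map over List.range
theorem modify_map_range {α : Type} (g : Nat → α) (h : α → α) (r j : Nat) (hj : j < r) :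
    ((List.range r).map g).modify j h = (List.range r).map (fun x => if x = j then h (g x) else g x) := by
  apply List.ext_getElem
  · simp
  intro i h1 h2
  simp only [List.getElem_modify, List.getElem_map, List.getElem_range]
  rcases eq_or_ne i j with rfl | hne
  · simp
  · simp [hne, Ne.symm hne]

-- set on a map over List.range
theorem set_map_range {α : Type} (g : Nat → α) (v : α) (r j : Nat) (hj : j < r) :
    ((List.range r).map g).set j v = (List.range r).map (fun x => if x = j then v else g x) := by
  apply List.ext_getElem
  · simp
  intro i h1 h2
  simp only [List.getElem_set, List.getElem_map, List.getElem_range]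
  rcases eq_or_ne i j with rfl | hne
  · simp
  · simp [hne, Ne.symm hne]

-- A's inner column-filling loop, one row at a time
theorem czytaj_inner (m : List (List (List Int))) (i : Nat) (t : Nat) (ht : t ≤ 9) (f : Nat → List (List Int)) :
    (List.range t).foldl (fun p j => p.modify j (fun col => col ++ [(m.getD i []).getD j []])) ((List.range 9).map f)
    = (List.range 9).map (fun x => if x < t then f x ++ [(m.getD i []).getD x []] else f x) := by
  induction t with
  | zero => simp
  | succ t ih =>
      rw [show List.range (t+1) = List.range t ++ [t] from List.range_succ, List.foldl_append,
        ih (by omega), List.foldl_cons, List.foldl_nil, modify_map_range _ _ _ _ (by omega)]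
      apply List.map_congr_left
      intro x hx
      rcases eq_or_ne x t with rfl | hne
      · simp
      · simp only [if_neg hne]
        by_cases hlt : x < t
        · simp only [if_pos hlt, if_pos (show x < t + 1 by omega)]
        · simp only [if_neg hlt, if_neg (show ¬ x < t + 1 by omega)]

-- czytajPiony builds the 9 columns: column x is the x-th entry of every row (empty past the grid)
theorem czytaj_eq (m : List (List (List Int))) (h9 : m.length ≤ 9) :
    czytajPiony m = (List.range 9).map (fun x =>
      if x < m.length then (List.range m.length).map (fun i => (m.getD i []).getD x []) else []) := by
  unfold czytajPiony
  have repl : (List.replicate 9 ([] : List (List Int))) = (List.range 9).map (fun _ => []) := by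
    simp [List.map_const']
  rw [repl]
  have key : ∀ k : Nat,
      (List.range k).foldl (fun piony i =>
        (List.range m.length).foldl (fun piony j =>
          piony.modify j (fun col => col ++ [(m.getD i []).getD j []])) piony)
        ((List.range 9).map (fun _ => []))
      = (List.range 9).map (fun x =>
          if x < m.length then (List.range k).map (fun i => (m.getD i []).getD x []) else []) := by
    intro k
    induction k with
    | zero => simp
    | succ k ih =>
        rw [show List.range (k+1) = List.range k ++ [k] from List.range_succ, List.foldl_append,
          ih, List.foldl_cons, List.foldl_nil, czytaj_inner m k m.length h9]
        apply List.map_congr_left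
        intro x hx
        by_cases hlt : x < m.length
        · simp [hlt]
        · simp [hlt]
  exact key m.length

-- B's counting loop counts, for each value, the number of cells of the column containing it
theorem cnt_getD (cells : List (List Int)) (d : PySem.Dict Int Int) (v : Int) :
    (cells.foldl (fun d cell =>
        (PySem.Set.ofList cell).foldl (fun d v => d.insert v (d.getD v 0 + 1)) d) d).getD v 0
      = d.getD v 0 + (cells.countP (fun c => decide (v ∈ c)) : Int) := by
  induction cells generalizing d with
  | nil => simp
  | cons c cs ih =>
      rw [List.foldl_cons, ih, PySem.Dict.getD_foldl_insert_add_one, List.countP_cons]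
      by_cases h : v ∈ c
      · rw [List.count_eq_one_of_mem (PySem.Set.nodup_ofList c) (by simpa [PySem.Set.mem_ofList] using h)]
        simp [h]; ring
      · rw [List.count_eq_zero.mpr (by simpa [PySem.Set.mem_ofList] using h)]
        simp [h]

-- A's temp loop is the concatenation of the other cells of the column
theorem temp_eq (h : Nat → List Int) (i n : Nat) :
    (List.range n).foldl (fun t j => if i ≠ j then t ++ h j else t) ([] : List Int)
    = ((List.range n).filter (fun j => decide (i ≠ j))).flatMap h := by
  rw [PySem.List.foldl_ite_eq_foldl_filter, PySem.List.foldl_append_eq_flatMap]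
  simp

-- for a value of cell i, "no other cell of the column contains it" = "its column count is 1"
theorem key_pred (g : Nat → List Int) (n i : Nat) (hi : i < n) (v : Int) (hv : v ∈ g i) :
    (!(PySem.Set.contains (PySem.Set.ofList
        (((List.range n).filter (fun j => decide (i ≠ j))).flatMap g)) v))
    = ((((List.range n).map g).foldl (fun d cell =>
          (PySem.Set.ofList cell).foldl (fun d v => d.insert v (d.getD v 0 + 1)) d)
          (PySem.Dict.empty : PySem.Dict Int Int)).getD v 0 == 1) := by
  rw [cnt_getD ((List.range n).map g) PySem.Dict.empty v, List.countP_map]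
  simp only [Function.comp_def, PySem.Dict.getD_empty, zero_add]
  have hperm : (List.range n).Perm (i :: (List.range n).erase i) :=
    List.perm_cons_erase (List.mem_range.mpr hi)
  have herase : (List.range n).erase i = (List.range n).filter (fun j => decide (i ≠ j)) := by
    rw [List.Nodup.erase_eq_filter (List.nodup_range) i]
    apply List.filter_congr
    intro j _
    rcases eq_or_ne i j with rfl | h
    · simp
    · simp [h, Ne.symm h]
  have htot : (List.range n).countP (fun j => decide (v ∈ g j))
      = ((List.range n).filter (fun j => decide (i ≠ j))).countP (fun j => decide (v ∈ g j)) + 1 := by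
    rw [hperm.countP_eq, List.countP_cons, herase]
    simp [hv]
  rw [htot]
  by_cases hm : v ∈ ((List.range n).filter (fun j => decide (i ≠ j))).flatMap g
  · have h1 : (PySem.Set.ofList (((List.range n).filter (fun j => decide (i ≠ j))).flatMap g)).contains v = true := by
      rw [PySem.Set.contains_iff, PySem.Set.mem_ofList]; exact hm
    have h2 : ((((((List.range n).filter (fun j => decide (i ≠ j))).countP (fun j => decide (v ∈ g j)) + 1 : Nat)) : Int) == 1) = false := by
      obtain ⟨j, hj, hvj⟩ := List.mem_flatMap.mp hm
      have hpos : 0 < ((List.range n).filter (fun j => decide (i ≠ j))).countP (fun j => decide (v ∈ g j)) :=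
        List.countP_pos_iff.mpr ⟨j, hj, by simp [hvj]⟩
      rw [beq_eq_false_iff_ne]; push_cast; omega
    rw [h1, h2]
    rfl
  · have hz : ((List.range n).filter (fun j => decide (i ≠ j))).countP (fun j => decide (v ∈ g j)) = 0 := by
      rw [List.countP_eq_zero]
      intro j hj
      simp only [decide_eq_true_eq]
      intro hvj
      exact hm (List.mem_flatMap.mpr ⟨j, hj, hvj⟩)
    have h1 : (PySem.Set.ofList (((List.range n).filter (fun j => decide (i ≠ j))).flatMap g)).contains v = false := by
      rw [← Bool.not_eq_true, PySem.Set.contains_iff, PySem.Set.mem_ofList]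
      exact hm
    rw [h1, hz]
    rfl

-- proof-side names for the loop bodies of the two ports
def roznA (pion : List (List Int)) : List (Option (List Int)) :=
  (List.range pion.length).foldl (fun r i =>
    if r.getD i none = none then
      r.set i (some (PySem.Set.diff (PySem.Set.ofList (pion.getD i []))
        (PySem.Set.ofList ((List.range pion.length).foldl (fun t j =>
          if i ≠ j then t ++ pion.getD j [] else t) []))))
    else r)
  (List.replicate 9 none)

def stepA (pion : List (List Int)) (x : Nat) (moz : List (List (List Int))) : List (List (List Int)) :=
  (List.range pion.length).foldl (fun moz i =>
    if (((roznA pion).getD i none).getD []).length = 1 then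
      moz.modify i (fun row => row.set x (((roznA pion).getD i none).getD []))
    else moz) moz

def cntB (col : List (List Int)) : PySem.Dict Int Int :=
  col.foldl (fun d cell =>
    (PySem.Set.ofList cell).foldl (fun d v => d.insert v (d.getD v 0 + 1)) d) PySem.Dict.empty

def stepB (col : List (List Int)) (n x : Nat) (moz : List (List (List Int))) : List (List (List Int)) :=
  (List.range n).foldl (fun moz i =>
    if ((PySem.Set.ofList (col.getD i [])).filter (fun v => (cntB col).getD v 0 == 1)).length = 1 then
      moz.modify i (fun row => row.set x ((PySem.Set.ofList (col.getD i [])).filter (fun v => (cntB col).getD v 0 == 1)))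
    else moz) moz

theorem unikatyPiony_eq (m : List (List (List Int))) :
    unikatyPiony m = (List.range (czytajPiony m).length).foldl
      (fun moz x => stepA ((czytajPiony m).getD x []) x moz) m := rfl

theorem unikatyPiony_alt_eq (m : List (List (List Int))) :
    unikatyPiony_alt m = (List.range m.length).foldl
      (fun moz x => stepB (((List.range m.length).map (fun x => (List.range m.length).map
        (fun i => (m.getD i []).getD x []))).getD x []) m.length x moz) m := rfl

theorem stepA_nil (x : Nat) (moz : List (List (List Int))) : stepA [] x moz = moz := by
  simp [stepA]

-- A's roznica loop fills, in order, one diff per cell of the column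
theorem roznica_eq (pion : List (List Int)) (h9 : pion.length ≤ 9) :
    roznA pion = (List.range 9).map (fun i =>
      if i < pion.length then
        some (PySem.Set.diff (PySem.Set.ofList (pion.getD i []))
          (PySem.Set.ofList ((List.range pion.length).foldl (fun t j =>
            if i ≠ j then t ++ pion.getD j [] else t) [])))
      else none) := by
  unfold roznA
  have repl : (List.replicate 9 (none : Option (List Int))) = (List.range 9).map (fun _ => none) := by
    simp [List.map_const']
  rw [repl]
  have key : ∀ k : Nat, k ≤ pion.length →
      (List.range k).foldl (fun r i =>
        if r.getD i none = none then
          r.set i (some (PySem.Set.diff (PySem.Set.ofList (pion.getD i []))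
            (PySem.Set.ofList ((List.range pion.length).foldl (fun t j =>
              if i ≠ j then t ++ pion.getD j [] else t) []))))
        else r) ((List.range 9).map (fun _ => none))
      = (List.range 9).map (fun i =>
          if i < k then
            some (PySem.Set.diff (PySem.Set.ofList (pion.getD i []))
              (PySem.Set.ofList ((List.range pion.length).foldl (fun t j =>
                if i ≠ j then t ++ pion.getD j [] else t) [])))
          else none) := by
    intro k
    induction k with
    | zero => intro _; simp
    | succ k ih =>
        intro hk
        rw [show List.range (k+1) = List.range k ++ [k] from List.range_succ, List.foldl_append,
          ih (by omega), List.foldl_cons, List.foldl_nil]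
        rw [getD_map_range' _ 9 k none, if_pos (show k < 9 by omega),
          if_neg (show ¬ k < k by omega), if_pos rfl, set_map_range _ _ 9 k (show k < 9 by omega)]
        apply List.map_congr_left
        intro i hi
        rcases eq_or_ne i k with rfl | hne
        · simp
        · simp only [if_neg hne]
          by_cases hlt : i < k
          · simp only [if_pos hlt, if_pos (show i < k + 1 by omega)]
          · simp only [if_neg hlt, if_neg (show ¬ i < k + 1 by omega)]
  exact key pion.length le_rfl

-- per column, A's step equals B's step
theorem stepAB (g : Nat → List Int) (n x : Nat) (h9 : n ≤ 9) (moz : List (List (List Int))) :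
    stepA ((List.range n).map g) x moz = stepB ((List.range n).map g) n x moz := by
  unfold stepA stepB
  simp only [List.length_map, List.length_range]
  apply PySem.List.foldl_congr_mem
  intro acc i hi
  have hin : i < n := List.mem_range.mp hi
  have hdv : (((roznA ((List.range n).map g)).getD i none).getD [])
      = (PySem.Set.ofList (((List.range n).map g).getD i [])).filter
          (fun v => (cntB ((List.range n).map g)).getD v 0 == 1) := by
    rw [roznica_eq _ (by simp [h9]), getD_map_range' _ 9 i none, if_pos (by omega)]
    simp only [List.length_map, List.length_range, if_pos hin, Option.getD_some]
    have htempf : (List.range n).foldl (fun t j =>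
        if i ≠ j then t ++ ((List.range n).map g).getD j [] else t) ([] : List Int)
        = (List.range n).foldl (fun t j => if i ≠ j then t ++ g j else t) [] := by
      apply PySem.List.foldl_congr_mem
      intro t j hj
      rw [getD_map_range' _ n j [], if_pos (List.mem_range.mp hj)]
    rw [htempf, temp_eq g i n]
    unfold PySem.Set.diff cntB
    apply List.filter_congr
    intro v hv
    rw [getD_map_range' _ n i [], if_pos hin] at hv
    exact key_pred g n i hin v ((PySem.Set.mem_ofList _ _).mp hv)
  rw [hdv]

theorem unikatyPiony_spec : Claim_equal_unikatyPiony := by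
  unfold Claim_equal_unikatyPiony
  intro m _ hpre
  obtain ⟨h9, -⟩ := hpre
  unfold Spec_unikatyPiony
  rw [unikatyPiony_eq, unikatyPiony_alt_eq]
  have hc := czytaj_eq m h9
  have hlen9 : (czytajPiony m).length = 9 := by rw [hc]; simp
  have hsplit : List.range 9 = List.range m.length ++ (List.range (9 - m.length)).map (fun k => m.length + k) := by
    conv_lhs => rw [show 9 = m.length + (9 - m.length) by omega]
    rw [List.range_add]
  rw [hlen9, hsplit, List.foldl_append]
  -- the columns past the grid are empty: those steps do nothing
  have htail : ∀ (z : List (List (List Int))),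
      ((List.range (9 - m.length)).map (fun k => m.length + k)).foldl
        (fun moz x => stepA ((czytajPiony m).getD x []) x moz) z = z := by
    intro z
    rw [PySem.List.foldl_congr_mem (g := fun acc _ => acc), PySem.List.foldl_ignore]
    intro acc x hx
    obtain ⟨k, hk, rfl⟩ := List.mem_map.mp hx
    have hzero : (czytajPiony m).getD (m.length + k) [] = [] := by
      rw [hc, getD_map_range']
      split_ifs with hlt9 hltn
      · omega
      · rfl
      · rfl
    rw [hzero, stepA_nil]
  rw [htail]
  apply PySem.List.foldl_congr_mem
  intro acc x hx
  have hxn : x < m.length := List.mem_range.mp hx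
  have hcolA : (czytajPiony m).getD x [] = (List.range m.length).map (fun i => (m.getD i []).getD x []) := by
    rw [hc, getD_map_range' _ 9 x [], if_pos (by omega), if_pos hxn]
  have hcolB : ((List.range m.length).map (fun x => (List.range m.length).map
      (fun i => (m.getD i []).getD x []))).getD x []
      = (List.range m.length).map (fun i => (m.getD i []).getD x []) := by
    rw [getD_map_range' _ m.length x [], if_pos hxn]
  rw [hcolA, hcolB, stepAB _ _ _ h9]
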